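-- pv_equiv track=rewrite | github.com/nf-microbe/modules | modules/nf-core/mvirs/parser/resources/usr/bin/mvirs_parser.py | find_direct_repeat
-- ===== SOURCE A (Python) =====
-- def find_direct_repeat(contig_seq, mge_start, mge_end, max_repeat=30, max_att=100):
--     """
--     Find the maximum direct repeat flanking a subsequence within a larger DNA sequence.
--
--     Args:
--         seq (str): The larger DNA sequence.
--         start (int): Start index of the subseq.
--         end (int): Start index of the subseq.
--
--     Returns:
--         int: The length of the maximum direct repeat.
--         str: The repeat sequence itself.
--     """
--
--     # Extract the flanks
--     left_flank = contig_seq[:mge_start]  # Left side of the subsequence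
--     right_flank = contig_seq[mge_end:]   # Right side of the subsequence
--
--     # Start with the largest possible repeat size and work down
--     for dr_len in range(max_repeat, 0, -1):
--
--         # Make sure enough flanking sequence is present for the DR + att site
--         if dr_len + max_att > len(left_flank) or dr_len + max_att > len(right_flank):
--             continue
--
--         # Get the potential repeat on both flanks
--         left_repeat = left_flank[-dr_len:]
--         right_repeat = right_flank[:dr_len]
--
--         # Check if the repeat is the same on both sides
--         if left_repeat == right_repeat:
--             dr_seq = left_repeat
--             return dr_len, dr_seq
--
--     # If no repeat is found, return 0 and an empty string
--     return 0, ""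
-- ===== SOURCE B (Python) =====
-- def _fall(pat, pi, s, ch):
--     # KMP transition: extend the current match s by ch, falling back via pi.
--     while s > 0 and (s == len(pat) or ch != pat[s]):
--         s = pi[s - 1]
--     if s < len(pat) and ch == pat[s]:
--         s += 1
--     return s
--
--
-- def find_direct_repeat(contig_seq, mge_start, mge_end, max_repeat=30, max_att=100):
--     # Linear-time direct-repeat search: the answer is the longest suffix of the
--     # left flank equal to a prefix of the right flank, capped by max_repeat and
--     # the max_att reserve; computed with one KMP prefix-function pass.
--     left_flank = contig_seq[:mge_start]
--     right_flank = contig_seq[mge_end:]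
--
--     cap = min(max_repeat, len(left_flank) - max_att, len(right_flank) - max_att)
--     if cap <= 0:
--         return 0, ""
--
--     pat = right_flank[:cap]                   # prefix candidates
--     txt = left_flank[len(left_flank) - cap:]  # suffix candidates
--
--     pi = [0]
--     k = 0
--     for ci in pat[1:]:
--         k = _fall(pat, pi, k, ci)
--         pi.append(k)
--
--     s = 0
--     for ch in txt:
--         s = _fall(pat, pi, s, ch)
--
--     if s > 0:
--         return s, left_flank[len(left_flank) - s:]
--     return 0, ""
-- ===== Notes on version B (the rewrite author's own statement) =====
-- stated objective: faster
-- what changed: Replaced A's descending scan that re-slices and re-compares a candidate repeat for every length with a single linear KMP pass (prefix function of the capped right-flank prefix, then one scan of the capped left-flank suffix) whose final automaton state is the longest flanking direct repeat.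
-- outside the precondition, e.g. on find_direct_repeat('AAAA', 2, 2, 30, -100): A returns (30, 'AA'), B returns (2, 'AA'); on find_direct_repeat('', 0, 0, 5, -10): A returns (5, ''), B returns (0, '')
import Mathlib
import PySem

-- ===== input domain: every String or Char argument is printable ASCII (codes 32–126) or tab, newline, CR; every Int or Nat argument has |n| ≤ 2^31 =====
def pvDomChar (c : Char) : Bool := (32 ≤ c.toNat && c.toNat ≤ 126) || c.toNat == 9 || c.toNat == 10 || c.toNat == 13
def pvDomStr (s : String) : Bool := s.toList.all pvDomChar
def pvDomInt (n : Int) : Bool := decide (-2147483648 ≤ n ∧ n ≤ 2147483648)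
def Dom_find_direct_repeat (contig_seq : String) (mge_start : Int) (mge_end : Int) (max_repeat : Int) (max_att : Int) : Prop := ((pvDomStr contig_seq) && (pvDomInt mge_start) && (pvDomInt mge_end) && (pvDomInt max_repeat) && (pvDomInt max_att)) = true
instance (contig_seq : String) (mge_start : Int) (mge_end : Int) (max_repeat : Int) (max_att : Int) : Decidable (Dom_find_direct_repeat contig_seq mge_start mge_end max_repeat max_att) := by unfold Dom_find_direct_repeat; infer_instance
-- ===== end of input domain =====

-- B replaces A's descending slice-comparison scan by one linear KMP prefix-function
-- overlap computation; same return value on Pre_.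

-- ===== PORT A =====
def findA_loop (left right : List Char) (max_att : Int) : List Int → Int × String
  | [] => (0, "")
  | d :: rest =>
    if d + max_att > (left.length : Int) ∨ d + max_att > (right.length : Int) then
      findA_loop left right max_att rest
    else
      let left_repeat := PySem.List.slice left (some (-d)) none
      let right_repeat := PySem.List.slice right none (some d)
      if left_repeat = right_repeat then (d, String.ofList left_repeat)
      else findA_loop left right max_att rest

def find_direct_repeat (contig_seq : String) (mge_start : Int) (mge_end : Int) (max_repeat : Int) (max_att : Int) : Int × String :=
  let left_flank := PySem.List.slice contig_seq.toList none (some mge_start)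
  let right_flank := PySem.List.slice contig_seq.toList (some mge_end) none
  findA_loop left_flank right_flank max_att (PySem.List.pyRange max_repeat 0 (-1))

-- ===== PORT B =====
-- the while loop of _fall (fuel only makes it total; with the pi table it never runs out)
def fallWhile (pat : List Char) (pi : List Nat) (ch : Char) : Nat → Nat → Nat
  | 0, s => s
  | fuel + 1, s =>
    if 0 < s ∧ (s = pat.length ∨ ¬ ch = pat.getD s 'A') then
      fallWhile pat pi ch fuel (pi.getD (s - 1) 0)
    else s

-- _fall(pat, pi, s, ch)
def fall (pat : List Char) (pi : List Nat) (s : Nat) (ch : Char) : Nat :=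
  let s' := fallWhile pat pi ch pat.length s
  if s' < pat.length ∧ ch = pat.getD s' 'A' then s' + 1 else s'

def find_direct_repeat_alt (contig_seq : String) (mge_start : Int) (mge_end : Int) (max_repeat : Int) (max_att : Int) : Int × String :=
  let left_flank := PySem.List.slice contig_seq.toList none (some mge_start)
  let right_flank := PySem.List.slice contig_seq.toList (some mge_end) none
  let cap := min max_repeat (min ((left_flank.length : Int) - max_att) ((right_flank.length : Int) - max_att))
  if cap ≤ 0 then (0, "")
  else
    let pat := PySem.List.slice right_flank none (some cap)
    let txt := PySem.List.slice left_flank (some ((left_flank.length : Int) - cap)) none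
    let st := (PySem.List.slice pat (some 1) none).foldl
      (fun (st : List Nat × Nat) ci => let k := fall pat st.1 st.2 ci; (st.1 ++ [k], k)) ([0], 0)
    let s := txt.foldl (fun s ch => fall pat st.1 s ch) 0
    if 0 < s then ((s : Int), String.ofList (PySem.List.slice left_flank (some ((left_flank.length : Int) - (s : Int))) none))
    else (0, "")

-- ===== PRECONDITION & SPEC =====
-- Pre_ keeps the tool's natural domain (any input with max_att ≥ 0, and any input whose
-- max_repeat fits inside both flanks); it excludes only inputs where a negative max_att
-- lets the candidate repeat length exceed a flank, where A can return a repeat length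
-- longer than the flank string itself.
def Pre_find_direct_repeat (contig_seq : String) (mge_start : Int) (mge_end : Int) (max_repeat : Int) (max_att : Int) : Prop :=
  0 ≤ max_att ∨
    max_repeat ≤ min ((PySem.List.slice contig_seq.toList none (some mge_start)).length : Int)
                     ((PySem.List.slice contig_seq.toList (some mge_end) none).length : Int)
instance (contig_seq : String) (mge_start : Int) (mge_end : Int) (max_repeat : Int) (max_att : Int) : Decidable (Pre_find_direct_repeat contig_seq mge_start mge_end max_repeat max_att) := by unfold Pre_find_direct_repeat; infer_instance

def pvWitness_find_direct_repeat : String × Int × Int × Int × Int := ("ACGTACGT", 4, 4, 4, 0)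

def Spec_find_direct_repeat (contig_seq : String) (mge_start : Int) (mge_end : Int) (max_repeat : Int) (max_att : Int) (out : Int × String) : Prop := out = find_direct_repeat_alt contig_seq mge_start mge_end max_repeat max_att
instance (contig_seq : String) (mge_start : Int) (mge_end : Int) (max_repeat : Int) (max_att : Int) (out : Int × String) : Decidable (Spec_find_direct_repeat contig_seq mge_start mge_end max_repeat max_att out) := by unfold Spec_find_direct_repeat; infer_instance

-- ===== CLAIM (what is proved, stated in full; the proofs are below) =====
def Claim_equal_find_direct_repeat : Prop := ∀ (contig_seq : String) (mge_start : Int) (mge_end : Int) (max_repeat : Int) (max_att : Int), Dom_find_direct_repeat contig_seq mge_start mge_end max_repeat max_att → Pre_find_direct_repeat contig_seq mge_start mge_end max_repeat max_att → Spec_find_direct_repeat contig_seq mge_start mge_end max_repeat max_att (find_direct_repeat contig_seq mge_start mge_end max_repeat max_att)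

-- ===== LEMMAS AND PROOFS =====

-- largest k ≤ n with f k = true (0 if none)
def argmax (f : Nat → Bool) : Nat → Nat
  | 0 => 0
  | n + 1 => if f (n + 1) then n + 1 else argmax f n

-- "d is an overlap": the last d chars of x equal the first d chars of p
def ovb (x p : List Char) (d : Nat) : Bool := decide (x.drop (x.length - d) = p.take d)

-- longest proper border of x (a prefix of p) against pattern p
def bord (p x : List Char) : Nat := argmax (ovb x p) (x.length - 1)

lemma argmax_le (f : Nat → Bool) (n : Nat) : argmax f n ≤ n := by
  induction n with
  | zero => simp [argmax]
  | succ n ih => simp only [argmax]; split <;> omega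

lemma argmax_spec (f : Nat → Bool) (n k : Nat) (hk : k ≤ n) (hf : f k = true) : k ≤ argmax f n := by
  induction n with
  | zero => omega
  | succ n ih =>
    simp only [argmax]; split
    · omega
    · rcases Nat.lt_or_ge k (n + 1) with h | h
      · exact ih (by omega)
      · have : k = n + 1 := by omega
        subst this; simp_all

lemma argmax_pos (f : Nat → Bool) (n : Nat) (h : 0 < argmax f n) : f (argmax f n) = true := by
  induction n with
  | zero => simp [argmax] at h
  | succ n ih =>
    by_cases hf : f (n + 1) = true
    · simp [argmax, hf]
    · simp only [argmax, hf] at h ⊢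
      exact ih h

lemma argmax_shrink (f : Nat → Bool) (n m : Nat) (hm : m ≤ n)
    (h : ∀ k, m < k → k ≤ n → f k = false) : argmax f n = argmax f m := by
  induction n with
  | zero => have : m = 0 := by omega
            subst this; rfl
  | succ n ih =>
    rcases Nat.lt_or_ge m (n + 1) with hlt | hge
    · simp only [argmax]
      rw [h (n + 1) (by omega) (by omega)]
      simp only [Bool.false_eq_true, if_false]
      exact ih (by omega) (fun k h1 h2 => h k h1 (by omega))
    · have : m = n + 1 := by omega
      simp [this]

lemma argmax_congr (f g : Nat → Bool) (n : Nat) (h : ∀ k, 1 ≤ k → k ≤ n → f k = g k) :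
    argmax f n = argmax g n := by
  induction n with
  | zero => simp [argmax]
  | succ n ih =>
    simp only [argmax]
    rw [h (n + 1) (by omega) (by omega)]
    split <;> [rfl; exact ih (fun k h1 h2 => h k h1 (by omega))]

lemma ovb_zero (x p : List Char) : ovb x p 0 = true := by simp [ovb]

-- chain lemma: given overlap d, overlaps j ≤ d of x are exactly overlaps of p.take d
lemma ov_chain (x p : List Char) (d j : Nat) (hd : ovb x p d = true) (hdx : d ≤ x.length)
    (hdp : d ≤ p.length) (hj : j ≤ d) : ovb x p j = ovb (p.take d) p j := by
  have hxd : x.drop (x.length - d) = p.take d := by simpa [ovb] using hd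
  have h2 : (p.take d).length = d := by
    simp [List.length_take]; omega
  have h3 : x.drop (x.length - j) = (p.take d).drop (d - j) := by
    rw [← hxd, List.drop_drop]
    congr 1
    omega
  simp only [ovb, h2, h3]

-- extension: nonzero overlaps of x ++ [c]
lemma ov_snoc (x p : List Char) (c : Char) (j : Nat) (hj : j ≤ x.length) (hjp : j < p.length) :
    (ovb (x ++ [c]) p (j + 1) = true) ↔ (ovb x p j = true ∧ p.getD j 'A' = c) := by
  have hdrop : (x ++ [c]).drop ((x ++ [c]).length - (j + 1)) = x.drop (x.length - j) ++ [c] := by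
    rw [List.length_append]
    have h1 : x.length + [c].length - (j + 1) = x.length - j := by simp
    rw [h1, List.drop_append_of_le_length (by omega)]
  have htake : p.take (j + 1) = p.take j ++ [p.getD j 'A'] := by
    rw [List.take_add_one, List.getElem?_eq_getElem hjp]
    simp [List.getD_eq_getElem?_getD, List.getElem?_eq_getElem hjp]
  constructor
  · intro h
    have h' := of_decide_eq_true h
    rw [hdrop, htake] at h'
    have he := List.append_inj' h' (by rfl)
    refine ⟨decide_eq_true he.1, ?_⟩
    have := he.2
    simp only [List.cons.injEq, and_true] at this
    exact this.symm
  · rintro ⟨h1, h2⟩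
    have h1' := of_decide_eq_true h1
    apply decide_eq_true
    rw [hdrop, htake, h1', h2]

-- the while loop walks the border chain: it returns the largest j ≤ s that is an
-- overlap of x and satisfies (j = 0 or p[j] = c)
lemma fallWhile_char (p : List Char) (pi : List Nat) (c : Char) (x : List Char)
    (hxp : x.length < p.length) :
    ∀ fuel s, s ≤ fuel → s ≤ x.length → ovb x p s = true →
    (∀ i, i < s → pi.getD i 0 = bord p (p.take (i + 1))) →
    (ovb x p (fallWhile p pi c fuel s) = true ∧
     fallWhile p pi c fuel s ≤ s ∧
     (fallWhile p pi c fuel s = 0 ∨ c = p.getD (fallWhile p pi c fuel s) 'A') ∧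
     (∀ d, d ≤ s → ovb x p d = true → c = p.getD d 'A' → d ≤ fallWhile p pi c fuel s)) := by
  intro fuel
  induction fuel with
  | zero =>
    intro s hs _ hov _
    have : s = 0 := by omega
    subst this
    exact ⟨hov, le_refl _, Or.inl rfl, fun d hd _ _ => by omega⟩
  | succ fuel ih =>
    intro s hs hsx hov hpi
    by_cases hcond : 0 < s ∧ (s = p.length ∨ ¬ c = p.getD s 'A')
    · -- loop body runs
      have hslen : s ≠ p.length := by omega
      have hne : ¬ c = p.getD s 'A' := by tauto
      have hrw : fallWhile p pi c (fuel + 1) s = fallWhile p pi c fuel (pi.getD (s - 1) 0) := by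
        simp only [fallWhile, if_pos hcond]
      have hb : pi.getD (s - 1) 0 = bord p (p.take s) := by
        have := hpi (s - 1) (by omega)
        rwa [Nat.sub_add_cancel (by omega)] at this
      have hplen : (p.take s).length = s := by simp [List.length_take]; omega
      have hbeq : bord p (p.take s) = argmax (ovb (p.take s) p) (s - 1) := by
        simp only [bord, hplen]
      have hble : pi.getD (s - 1) 0 ≤ s - 1 := by
        rw [hb, hbeq]; exact argmax_le _ _
      have hbov : ovb (p.take s) p (pi.getD (s - 1) 0) = true := by
        rw [hb]
        rcases Nat.eq_zero_or_pos (bord p (p.take s)) with h0 | h0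
        · rw [h0]; exact ovb_zero _ _
        · rw [hbeq] at h0 ⊢
          exact argmax_pos _ _ h0
      have hchain : ∀ j, j ≤ s → ovb x p j = ovb (p.take s) p j := fun j hj =>
        ov_chain x p s j hov hsx (by omega) hj
      have hovs' : ovb x p (pi.getD (s - 1) 0) = true := by
        rw [hchain _ (by omega)]; exact hbov
      obtain ⟨r1, r2, r3, r4⟩ := ih (pi.getD (s - 1) 0) (by omega) (by omega) hovs'
        (fun i hi => hpi i (by omega))
      rw [hrw]
      refine ⟨r1, by omega, r3, ?_⟩
      intro d hd hdov hdc
      rcases Nat.lt_or_ge d s with hds | hds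
      · -- d < s: d is an overlap of p.take s, hence ≤ bord = s'
        rcases Nat.eq_zero_or_pos d with h0 | h0
        · subst h0; exact r4 0 (by omega) (ovb_zero _ _) hdc
        · have hda : ovb (p.take s) p d = true := by rw [← hchain d (by omega)]; exact hdov
          have hle : d ≤ pi.getD (s - 1) 0 := by
            rw [hb, hbeq]
            exact argmax_spec _ _ _ (by omega) hda
          exact r4 d hle hdov hdc
      · -- d = s: contradicts the loop condition
        have : d = s := by omega
        subst this
        exact absurd hdc hne
    · -- loop exits
      have hrw : fallWhile p pi c (fuel + 1) s = s := by
        simp only [fallWhile, if_neg hcond]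
      rw [hrw]
      refine ⟨hov, le_refl _, ?_, fun d hd _ _ => hd⟩
      by_cases h0 : s = 0
      · exact Or.inl h0
      · right
        by_contra hne
        exact hcond ⟨by omega, Or.inr hne⟩

-- one _fall call computes the maximal overlap of x ++ [c] among candidates ≤ s₀ + 1
lemma fall_char (p : List Char) (pi : List Nat) (c : Char) (x : List Char) (s₀ : Nat)
    (hxp : x.length < p.length) (hs : s₀ ≤ x.length) (hov : ovb x p s₀ = true)
    (hpi : ∀ i, i < s₀ → pi.getD i 0 = bord p (p.take (i + 1))) :
    fall p pi s₀ c = argmax (ovb (x ++ [c]) p) (s₀ + 1) := by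
  obtain ⟨h1, h2, h3, h4⟩ := fallWhile_char p pi c x hxp p.length s₀ (by omega) hs hov hpi
  set t := fallWhile p pi c p.length s₀ with ht
  have htx : t ≤ x.length := by omega
  have htp : t < p.length := by omega
  by_cases hc : c = p.getD t 'A'
  · have hrw : fall p pi s₀ c = t + 1 := by
      simp only [fall, ← ht, if_pos (And.intro htp hc)]
    rw [hrw]
    have hf : ovb (x ++ [c]) p (t + 1) = true :=
      (ov_snoc x p c t htx htp).mpr ⟨h1, hc.symm⟩
    have hle : t + 1 ≤ argmax (ovb (x ++ [c]) p) (s₀ + 1) :=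
      argmax_spec _ _ _ (by omega) hf
    have hge : argmax (ovb (x ++ [c]) p) (s₀ + 1) ≤ t + 1 := by
      rcases Nat.eq_zero_or_pos (argmax (ovb (x ++ [c]) p) (s₀ + 1)) with h0 | h0
      · omega
      · have hMf := argmax_pos (ovb (x ++ [c]) p) (s₀ + 1) h0
        have hMle := argmax_le (ovb (x ++ [c]) p) (s₀ + 1)
        obtain ⟨j, hj⟩ : ∃ j, argmax (ovb (x ++ [c]) p) (s₀ + 1) = j + 1 :=
          ⟨argmax (ovb (x ++ [c]) p) (s₀ + 1) - 1, by omega⟩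
        rw [hj] at hMf
        have hjx : j ≤ x.length := by omega
        have hjp : j < p.length := by omega
        obtain ⟨hja, hjb⟩ := (ov_snoc x p c j hjx hjp).mp hMf
        have := h4 j (by omega) hja hjb.symm
        omega
    omega
  · have hrw : fall p pi s₀ c = t := by
      simp only [fall, ← ht]
      rw [if_neg]
      tauto
    have ht0 : t = 0 := by tauto
    rw [hrw, ht0]
    by_contra hne
    have h0 : 0 < argmax (ovb (x ++ [c]) p) (s₀ + 1) := by omega
    have hMf := argmax_pos (ovb (x ++ [c]) p) (s₀ + 1) h0
    have hMle := argmax_le (ovb (x ++ [c]) p) (s₀ + 1)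
    obtain ⟨j, hj⟩ : ∃ j, argmax (ovb (x ++ [c]) p) (s₀ + 1) = j + 1 :=
      ⟨argmax (ovb (x ++ [c]) p) (s₀ + 1) - 1, by omega⟩
    rw [hj] at hMf
    obtain ⟨hja, hjb⟩ := (ov_snoc x p c j (by omega) (by omega)).mp hMf
    have hj0 := h4 j (by omega) hja hjb.symm
    rw [ht0] at hj0
    have : j = 0 := by omega
    subst this
    rw [← ht0] at hjb
    exact hc hjb.symm

-- scan step: from the maximal overlap of x to the maximal overlap of x ++ [c]
lemma step_scan (p : List Char) (pi : List Nat) (c : Char) (x : List Char)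
    (hxp : x.length < p.length)
    (hpi : ∀ i, i < p.length → pi.getD i 0 = bord p (p.take (i + 1))) :
    fall p pi (argmax (ovb x p) x.length) c = argmax (ovb (x ++ [c]) p) (x.length + 1) := by
  set s₀ := argmax (ovb x p) x.length with hs₀
  have hs : s₀ ≤ x.length := argmax_le _ _
  have hov : ovb x p s₀ = true := by
    rcases Nat.eq_zero_or_pos s₀ with h0 | h0
    · rw [h0]; exact ovb_zero _ _
    · exact argmax_pos _ _ h0
  rw [fall_char p pi c x s₀ hxp hs hov (fun i hi => hpi i (by omega))]
  refine (argmax_shrink _ _ _ (by omega) ?_).symm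
  intro k hk1 hk2
  by_contra hkf
  have hkf' : ovb (x ++ [c]) p k = true := by
    cases h : ovb (x ++ [c]) p k
    · exact absurd h hkf
    · rfl
  obtain ⟨j, hj⟩ : ∃ j, k = j + 1 := ⟨k - 1, by omega⟩
  rw [hj] at hkf'
  obtain ⟨hja, _⟩ := (ov_snoc x p c j (by omega) (by omega)).mp hkf'
  have := argmax_spec (ovb x p) x.length j (by omega) hja
  omega

-- build step: from bord(p.take i) to bord(p.take (i+1))
lemma step_build (p : List Char) (pi : List Nat) (i : Nat) (hi1 : 1 ≤ i) (hin : i < p.length)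
    (hpi : ∀ j, j < i → pi.getD j 0 = bord p (p.take (j + 1))) :
    fall p pi (bord p (p.take i)) (p.getD i 'A') = bord p (p.take (i + 1)) := by
  have hxl : (p.take i).length = i := by simp [List.length_take]; omega
  have hxc : p.take i ++ [p.getD i 'A'] = p.take (i + 1) := by
    rw [List.take_add_one, List.getElem?_eq_getElem hin]
    simp [List.getD_eq_getElem?_getD, List.getElem?_eq_getElem hin]
  have hbeq : bord p (p.take i) = argmax (ovb (p.take i) p) (i - 1) := by
    simp only [bord, hxl]
  have hble : bord p (p.take i) ≤ i - 1 := by rw [hbeq]; exact argmax_le _ _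
  have hov : ovb (p.take i) p (bord p (p.take i)) = true := by
    rcases Nat.eq_zero_or_pos (bord p (p.take i)) with h0 | h0
    · rw [h0]; exact ovb_zero _ _
    · rw [hbeq] at h0 ⊢
      exact argmax_pos _ _ h0
  rw [fall_char p pi (p.getD i 'A') (p.take i) (bord p (p.take i))
      (by rw [hxl]; omega) (by rw [hxl]; omega) hov
      (fun j hj => hpi j (by omega))]
  rw [hxc]
  have hlen1 : (p.take (i + 1)).length = i + 1 := by simp [List.length_take]; omega
  have hbeq1 : bord p (p.take (i + 1)) = argmax (ovb (p.take (i + 1)) p) i := by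
    simp only [bord, hlen1, Nat.add_sub_cancel]
  rw [hbeq1]
  refine (argmax_shrink _ i (bord p (p.take i) + 1) (by omega) ?_).symm
  intro k hk1 hk2
  by_contra hkf
  have hkf' : ovb (p.take (i + 1)) p k = true := by
    cases h : ovb (p.take (i + 1)) p k
    · exact absurd h hkf
    · rfl
  obtain ⟨j, hj⟩ : ∃ j, k = j + 1 := ⟨k - 1, by omega⟩
  rw [hj, ← hxc] at hkf'
  obtain ⟨hja, _⟩ := (ov_snoc (p.take i) p (p.getD i 'A') j (by rw [hxl]; omega) (by omega)).mp hkf'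
  have : j ≤ bord p (p.take i) := by
    rw [hbeq]
    exact argmax_spec _ _ _ (by omega) hja
  omega

-- the correct pi table of length i
def piOf (p : List Char) (i : Nat) : List Nat := (List.range i).map (fun j => bord p (p.take (j + 1)))

lemma piOf_getD (p : List Char) (i j : Nat) (hj : j < i) :
    (piOf p i).getD j 0 = bord p (p.take (j + 1)) := by
  simp [piOf, List.getD_eq_getElem?_getD, hj]

lemma bord_take_one (p : List Char) : bord p (p.take 1) = 0 := by
  simp [bord, argmax]

lemma piOf_one (p : List Char) : piOf p 1 = [0] := by
  simp [piOf, bord_take_one]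

lemma piOf_succ (p : List Char) (i : Nat) :
    piOf p (i + 1) = piOf p i ++ [bord p (p.take (i + 1))] := by
  simp [piOf, List.range_succ]

-- the pi-building fold computes the full correct table
lemma build_fold (p : List Char) : ∀ m i, 1 ≤ i → i ≤ p.length → m = p.length - i →
    (p.drop i).foldl (fun (st : List Nat × Nat) ci => let k := fall p st.1 st.2 ci; (st.1 ++ [k], k))
      (piOf p i, bord p (p.take i)) = (piOf p p.length, bord p (p.take p.length)) := by
  intro m
  induction m with
  | zero =>
    intro i h1 h2 h3
    have : i = p.length := by omega
    subst this
    simp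
  | succ m ih =>
    intro i h1 h2 h3
    have hin : i < p.length := by omega
    rw [List.drop_eq_getElem_cons hin]
    simp only [List.foldl_cons]
    have hgd : p[i] = p.getD i 'A' := by
      simp [List.getD_eq_getElem?_getD, List.getElem?_eq_getElem hin]
    have hstep : fall p (piOf p i) (bord p (p.take i)) p[i] = bord p (p.take (i + 1)) := by
      rw [hgd]
      exact step_build p (piOf p i) i h1 hin (fun j hj => piOf_getD p i j hj)
    rw [hstep, ← piOf_succ]
    exact ih (i + 1) (by omega) (by omega) (by omega)

-- the scan fold computes the maximal overlap of the whole text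
lemma scan_fold (p : List Char) (pi : List Nat)
    (hpi : ∀ i, i < p.length → pi.getD i 0 = bord p (p.take (i + 1))) :
    ∀ (v x : List Char), x.length + v.length ≤ p.length →
    v.foldl (fun s ch => fall p pi s ch) (argmax (ovb x p) x.length)
      = argmax (ovb (x ++ v) p) (x ++ v).length := by
  intro v
  induction v with
  | nil => intro x _; simp
  | cons c v ih =>
    intro x hlen
    simp only [List.foldl_cons]
    have hxp : x.length < p.length := by simp at hlen; omega
    rw [step_scan p pi c x hxp hpi]
    have h1 : x.length + 1 = (x ++ [c]).length := by simp
    rw [h1, ih (x ++ [c]) (by simp at hlen ⊢; omega)]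
    simp

-- characterization of A's descending loop
lemma findA_char (L R : List Char) (ma : Int) :
    ∀ (N : Nat) (m : Int), m ≤ (N : Int) →
    findA_loop L R ma (PySem.List.pyRange m 0 (-1)) =
      (if argmax (ovb L R) (min m (min ((L.length : Int) - ma) ((R.length : Int) - ma))).toNat = 0
       then ((0 : Int), "")
       else (((argmax (ovb L R) (min m (min ((L.length : Int) - ma) ((R.length : Int) - ma))).toNat : Nat) : Int),
             String.ofList (L.drop (L.length - argmax (ovb L R) (min m (min ((L.length : Int) - ma) ((R.length : Int) - ma))).toNat)))) := by
  intro N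
  induction N with
  | zero =>
    intro m hm
    rw [PySem.List.pyRange_neg_one_eq_nil (by omega)]
    have h0 : (min m (min ((L.length : Int) - ma) ((R.length : Int) - ma))).toNat = 0 := by omega
    rw [h0]
    simp [findA_loop, argmax]
  | succ N ih =>
    intro m hm
    by_cases hm0 : m ≤ 0
    · rw [PySem.List.pyRange_neg_one_eq_nil (by omega)]
      have h0 : (min m (min ((L.length : Int) - ma) ((R.length : Int) - ma))).toNat = 0 := by omega
      rw [h0]
      simp [findA_loop, argmax]
    · push_neg at hm0
      rw [PySem.List.pyRange_neg_one_cons (by omega)]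
      simp only [findA_loop]
      set X := min ((L.length : Int) - ma) ((R.length : Int) - ma) with hX
      by_cases hskip : m + ma > (L.length : Int) ∨ m + ma > (R.length : Int)
      · rw [if_pos hskip]
        have hXm : min m X = min (m - 1) X := by omega
        rw [ih (m - 1) (by omega)]
        rw [hXm]
      · rw [if_neg hskip]
        push_neg at hskip
        have hmX : min m X = m := by omega
        have hmnat : ((m.toNat : Nat) : Int) = m := by omega
        have hlr : PySem.List.slice L (some (-m)) none = L.drop (L.length - m.toNat) := by
          rw [show (-m) = -((m.toNat : Nat) : Int) by omega]
          rw [PySem.List.slice_some_none, PySem.List.clampIdx_neg_natCast _ _ (by omega)]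
        have hrr : PySem.List.slice R none (some m) = R.take m.toNat := by
          rw [PySem.List.slice_to _ (by omega)]
        rw [hlr, hrr]
        have hargm : (min m X).toNat = m.toNat := by omega
        rw [hargm]
        obtain ⟨t, ht⟩ : ∃ t, m.toNat = t + 1 := ⟨m.toNat - 1, by omega⟩
        by_cases heq : L.drop (L.length - m.toNat) = R.take m.toNat
        · rw [if_pos heq]
          have hov : ovb L R m.toNat = true := decide_eq_true heq
          rw [ht] at hov ⊢
          simp only [argmax, hov, if_pos]
          rw [if_neg (by omega)]
          rw [← ht, hmnat, ht]
        · rw [if_neg heq]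
          have hov : ovb L R m.toNat = false := by
            simp [ovb, heq]
          rw [ih (m - 1) (by omega)]
          have h1 : min (m - 1) X = m - 1 := by omega
          have h2 : (m - 1).toNat = t := by omega
          rw [ht] at hov
          rw [h1, h2, ht]
          simp only [argmax, hov]
          simp

-- ===== VERDICT (by name: the statement is the Claim_ definition above) =====
theorem find_direct_repeat_spec : Claim_equal_find_direct_repeat := by
  intro contig_seq mge_start mge_end max_repeat max_att _hDom hPre
  unfold Spec_find_direct_repeat
  set L := PySem.List.slice contig_seq.toList none (some mge_start) with hL
  set R := PySem.List.slice contig_seq.toList (some mge_end) none with hR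
  set X := min ((L.length : Int) - max_att) ((R.length : Int) - max_att) with hX
  set cap := min max_repeat X with hcap
  have hA : find_direct_repeat contig_seq mge_start mge_end max_repeat max_att =
      (if argmax (ovb L R) cap.toNat = 0 then ((0 : Int), "")
       else (((argmax (ovb L R) cap.toNat : Nat) : Int),
             String.ofList (L.drop (L.length - argmax (ovb L R) cap.toNat)))) := by
    unfold find_direct_repeat
    rw [← hL, ← hR]
    exact findA_char L R max_att max_repeat.toNat max_repeat (by omega)
  have hB : find_direct_repeat_alt contig_seq mge_start mge_end max_repeat max_att =
      (if cap ≤ 0 then ((0 : Int), "")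
       else
         let pat := PySem.List.slice R none (some cap)
         let txt := PySem.List.slice L (some ((L.length : Int) - cap)) none
         let st := (PySem.List.slice pat (some 1) none).foldl
           (fun (st : List Nat × Nat) ci => let k := fall pat st.1 st.2 ci; (st.1 ++ [k], k)) ([0], 0)
         let s := txt.foldl (fun s ch => fall pat st.1 s ch) 0
         if 0 < s then ((s : Int), String.ofList (PySem.List.slice L (some ((L.length : Int) - (s : Int))) none))
         else ((0 : Int), "")) := rfl
  rw [hA, hB]
  by_cases hc0 : cap ≤ 0
  · rw [if_pos hc0]
    have h0 : cap.toNat = 0 := by omega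
    rw [h0]
    simp [argmax]
  · rw [if_neg hc0]
    push_neg at hc0
    have hPre' : cap ≤ (L.length : Int) ∧ cap ≤ (R.length : Int) := by
      unfold Pre_find_direct_repeat at hPre
      rw [← hL, ← hR] at hPre
      rcases hPre with h | h <;> constructor <;> omega
    have hn1 : 1 ≤ cap.toNat := by omega
    have hnl : cap.toNat ≤ L.length := by omega
    have hnr : cap.toNat ≤ R.length := by omega
    have hpat : PySem.List.slice R none (some cap) = R.take cap.toNat :=
      PySem.List.slice_to _ (by omega)
    have htxt : PySem.List.slice L (some ((L.length : Int) - cap)) none = L.drop (L.length - cap.toNat) := by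
      rw [PySem.List.slice_from _ (by omega)]
      congr 1
      omega
    set p := R.take cap.toNat with hp
    set txt := L.drop (L.length - cap.toNat) with htxtdef
    have hplen : p.length = cap.toNat := by
      rw [hp, List.length_take]; omega
    have htlen : txt.length = cap.toNat := by
      rw [htxtdef, List.length_drop]; omega
    have hslice1 : PySem.List.slice p (some 1) none = p.drop 1 := by
      rw [PySem.List.slice_from _ (by omega)]
      norm_num
    have hbuild : (p.drop 1).foldl
        (fun (st : List Nat × Nat) ci => let k := fall p st.1 st.2 ci; (st.1 ++ [k], k)) ([0], 0)
        = (piOf p p.length, bord p (p.take p.length)) := by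
      have hinit : (([0], 0) : List Nat × Nat) = (piOf p 1, bord p (p.take 1)) := by
        rw [piOf_one, bord_take_one]
      rw [hinit]
      exact build_fold p (p.length - 1) 1 (by omega) (by omega) (by omega)
    have hscan : txt.foldl (fun s ch => fall p (piOf p p.length) s ch) 0
        = argmax (ovb txt p) cap.toNat := by
      have h0 : (0 : Nat) = argmax (ovb ([] : List Char) p) ([] : List Char).length := by
        simp [argmax]
      rw [h0, scan_fold p (piOf p p.length) (fun i hi => piOf_getD p p.length i hi) txt []
        (by simp [htlen, hplen])]
      simp [htlen]
    have hagree : argmax (ovb txt p) cap.toNat = argmax (ovb L R) cap.toNat := by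
      apply argmax_congr
      intro k hk1 hk2
      have h1 : txt.drop (txt.length - k) = L.drop (L.length - k) := by
        have hdl : txt.length = cap.toNat := htlen
        rw [htxtdef] at hdl ⊢
        rw [List.drop_drop]
        congr 1
        omega
      have h2 : p.take k = R.take k := by
        rw [hp, List.take_take]
        congr 1
        omega
      simp only [ovb, h1, h2]
    simp only [hpat, htxt, hslice1]
    rw [hbuild]
    simp only []
    rw [hscan, hagree]
    set g := argmax (ovb L R) cap.toNat with hg
    have hgle : g ≤ cap.toNat := by rw [hg]; exact argmax_le _ _
    by_cases hg0 : 0 < g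
    · rw [if_pos hg0, if_neg (by omega)]
      have hsl : PySem.List.slice L (some ((L.length : Int) - (g : Int))) none = L.drop (L.length - g) := by
        rw [PySem.List.slice_from _ (by omega)]
        congr 1
        omega
      rw [hsl]
    · rw [if_neg hg0, if_pos (by omega)]
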